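-- pv_equiv track=rewrite | github.com/Light-Heart-Labs/MMBT-Messy-Model-Bench-Tests | benchmarks/wallstreet-intern-test/Opus-4.7/scripts/extract_financials.py | latest_per_period
-- ===== SOURCE A (Python) =====
-- def latest_per_period(rows: list[dict], fp_filter: str | None = None) -> dict[str, dict]:
--     """Group by 'end' date keeping the most recently filed value (handles restatements).
--     fp_filter: 'FY' to keep only annual rows, 'Q1'/'Q2'/'Q3' for quarterly, None for any.
--     """
--     by_end: dict[str, dict] = {}
--     for r in rows:
--         if fp_filter and r.get("fp") != fp_filter:
--             continue
--         if fp_filter == "FY" and r.get("form") != "10-K":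
--             continue
--         end = r["end"]
--         if end not in by_end or r["filed"] > by_end[end]["filed"]:
--             by_end[end] = r
--     return by_end
-- ===== SOURCE B (Python) =====
-- def latest_per_period(rows: list[dict], fp_filter: str | None = None) -> dict[str, dict]:
--     """Group by 'end' date keeping the most recently filed value (handles restatements).
--     fp_filter: 'FY' to keep only annual rows, 'Q1'/'Q2'/'Q3' for quarterly, None for any.
--     """
--     groups: dict[str, list[dict]] = {}
--     for r in rows:
--         if fp_filter and r.get("fp") != fp_filter:
--             continue
--         if fp_filter == "FY" and r.get("form") != "10-K":
--             continue
--         groups.setdefault(r["end"], []).append(r)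
--     return {end: max(grp, key=lambda r: r["filed"]) for end, grp in groups.items()}
-- ===== Notes on version B (the rewrite author's own statement) =====
-- stated objective: alternative
-- what changed: B replaces A's single-pass insert-or-overwrite dict loop by a two-phase decomposition: first group the filtered rows by 'end' into lists, then reduce each group with max(key=filed) (first maximal element), which reproduces A's strict-'>' keep-first tie-break and first-occurrence key order.
-- outside the precondition, e.g. on latest_per_period([{'end': '2021'}], None): A returns {'2021': {'end': '2021'}}, B raises KeyError
import Mathlib
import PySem

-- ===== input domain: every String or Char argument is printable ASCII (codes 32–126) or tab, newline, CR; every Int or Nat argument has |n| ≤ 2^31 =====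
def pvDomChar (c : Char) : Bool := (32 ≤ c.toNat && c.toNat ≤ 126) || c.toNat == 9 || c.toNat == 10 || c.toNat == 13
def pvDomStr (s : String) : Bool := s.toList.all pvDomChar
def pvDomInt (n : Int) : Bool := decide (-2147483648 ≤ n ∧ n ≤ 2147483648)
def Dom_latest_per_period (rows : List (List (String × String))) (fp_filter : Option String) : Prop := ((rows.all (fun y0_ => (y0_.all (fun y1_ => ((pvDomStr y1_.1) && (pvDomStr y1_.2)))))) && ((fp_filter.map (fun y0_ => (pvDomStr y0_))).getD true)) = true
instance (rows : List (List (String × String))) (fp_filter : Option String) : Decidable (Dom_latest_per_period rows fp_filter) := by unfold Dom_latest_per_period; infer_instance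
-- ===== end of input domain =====

-- B regroups rows by 'end' first and then reduces each group with Python max(key=filed);
-- equivalence of the return value with A's single-pass overwrite loop is proved below.

-- dict lookup on a row (association list, first match): r.get(k) / r[k]
def pvRowGet (r : List (String × String)) (k : String) : Option String :=
  (r.find? (fun p => p.1 == k)).map (·.2)

-- `if fp_filter and r.get("fp") != fp_filter: continue` (both Pythons have this line)
def pvSkip1 (r : List (String × String)) (fp_filter : Option String) : Bool :=
  match fp_filter with
  | none => false
  | some f => decide (f ≠ "") && (pvRowGet r "fp" != some f)

-- `if fp_filter == "FY" and r.get("form") != "10-K": continue` (both Pythons have this line)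
def pvSkip2 (r : List (String × String)) (fp_filter : Option String) : Bool :=
  (fp_filter == some "FY") && (pvRowGet r "form" != some "10-K")

-- r["filed"] as used in a comparison; none (Python KeyError) is excluded by Pre_
def pvFiled (r : List (String × String)) : String :=
  (pvRowGet r "filed").getD ""

-- ===== PORT A =====
def latest_per_period (rows : List (List (String × String))) (fp_filter : Option String) : List (String × List (String × String)) :=
  (rows.foldl
    (fun (by_end : PySem.Dict String (List (String × String))) r =>
      if pvSkip1 r fp_filter then by_end
      else if pvSkip2 r fp_filter then by_end
      else
        -- end = r["end"]; KeyError (none) is excluded by Pre_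
        let e := (pvRowGet r "end").getD ""
        -- `if end not in by_end or r["filed"] > by_end[end]["filed"]` (short-circuit kept)
        if by_end.contains e = false then by_end.insert e r
        else if pvFiled (by_end.getD e []) < pvFiled r then by_end.insert e r
        else by_end)
    PySem.Dict.empty).items

-- ===== PORT B =====
-- Python max(grp, key=lambda r: r["filed"]): first element with the maximal key (strict '>')
def pvMaxByFiled : List (List (String × String)) → List (String × String)
  | [] => []   -- Python max raises on []; groups built below are never empty
  | h :: t => t.foldl (fun best r => if pvFiled best < pvFiled r then r else best) h

def latest_per_period_alt (rows : List (List (String × String))) (fp_filter : Option String) : List (String × List (String × String)) :=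
  ((rows.foldl
      (fun (groups : PySem.Dict String (List (List (String × String)))) r =>
        if pvSkip1 r fp_filter then groups
        else if pvSkip2 r fp_filter then groups
        -- groups.setdefault(r["end"], []).append(r); KeyError (none) excluded by Pre_
        else groups.modify ((pvRowGet r "end").getD "") [] (· ++ [r]))
      PySem.Dict.empty).items).map
    (fun p => (p.1, pvMaxByFiled p.2))

-- ===== PRECONDITION & SPEC =====
-- Pre_ excludes inputs on which a row surviving the fp/form guards lacks an "end" or "filed"
-- key: there Python A either raises KeyError itself or (row lacking only "filed", its "end"
-- unique) returns while B's max(key=...) raises KeyError, so no common value exists to claim.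
def Pre_latest_per_period (rows : List (List (String × String))) (fp_filter : Option String) : Prop :=
  ∀ r ∈ rows, (!pvSkip1 r fp_filter && !pvSkip2 r fp_filter) = true →
    ((pvRowGet r "end").isSome = true ∧ (pvRowGet r "filed").isSome = true)
instance (rows : List (List (String × String))) (fp_filter : Option String) : Decidable (Pre_latest_per_period rows fp_filter) := by unfold Pre_latest_per_period; infer_instance

def pvWitness_latest_per_period : (List (List (String × String))) × Option String :=
  ([[("end", "2020-12-31"), ("filed", "2021-02-01"), ("fp", "FY"), ("form", "10-K")],
    [("end", "2020-12-31"), ("filed", "2021-03-01"), ("fp", "FY"), ("form", "10-K")]], some "FY")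

def Spec_latest_per_period (rows : List (List (String × String))) (fp_filter : Option String) (out : List (String × List (String × String))) : Prop := out = latest_per_period_alt rows fp_filter
instance (rows : List (List (String × String))) (fp_filter : Option String) (out : List (String × List (String × String))) : Decidable (Spec_latest_per_period rows fp_filter out) := by unfold Spec_latest_per_period; infer_instance

-- ===== CLAIM (what is proved, stated in full; the proofs are below) =====
def Claim_equal_latest_per_period : Prop := ∀ (rows : List (List (String × String))) (fp_filter : Option String), Dom_latest_per_period rows fp_filter → Pre_latest_per_period rows fp_filter → Spec_latest_per_period rows fp_filter (latest_per_period rows fp_filter)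

-- ===== LEMMAS AND PROOFS =====

-- Python max over grp ++ [r] is A's strict-'>' update step applied to max over grp
theorem pvMaxByFiled_append (grp : List (List (String × String))) (r : List (String × String))
    (h : grp ≠ []) :
    pvMaxByFiled (grp ++ [r]) =
      if pvFiled (pvMaxByFiled grp) < pvFiled r then r else pvMaxByFiled grp := by
  cases grp with
  | nil => exact absurd rfl h
  | cons a t => simp [pvMaxByFiled, List.foldl_append]

-- the invariant tying A's running dict to B's running groups
def pvInv (d : PySem.Dict String (List (String × String)))
    (g : PySem.Dict String (List (List (String × String)))) : Prop :=
  d.items = g.items.map (fun p => (p.1, pvMaxByFiled p.2)) ∧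
  g.keys.Nodup ∧ (∀ p ∈ g.items, p.2 ≠ [])

theorem pvInv_step (d : PySem.Dict String (List (String × String)))
    (g : PySem.Dict String (List (List (String × String))))
    (fp_filter : Option String) (r : List (String × String)) (hI : pvInv d g) :
    pvInv
      (if pvSkip1 r fp_filter then d
       else if pvSkip2 r fp_filter then d
       else
         let e := (pvRowGet r "end").getD ""
         if d.contains e = false then d.insert e r
         else if pvFiled (d.getD e []) < pvFiled r then d.insert e r
         else d)
      (if pvSkip1 r fp_filter then g
       else if pvSkip2 r fp_filter then g
       else g.modify ((pvRowGet r "end").getD "") [] (· ++ [r])) := by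
  obtain ⟨hItems, hNodup, hNe⟩ := hI
  by_cases h1 : pvSkip1 r fp_filter = true
  · simpa [h1] using ⟨hItems, hNodup, hNe⟩
  by_cases h2 : pvSkip2 r fp_filter = true
  · simpa [h1, h2] using ⟨hItems, hNodup, hNe⟩
  simp only [h1, h2, Bool.false_eq_true, if_false]
  set e := (pvRowGet r "end").getD "" with he
  have hkeys : d.keys = g.keys := by
    show d.items.map Prod.fst = g.items.map Prod.fst
    simp [hItems, Function.comp]
  have hcont : d.contains e = g.contains e := by
    rw [PySem.Dict.contains_eq_decide_mem_keys, PySem.Dict.contains_eq_decide_mem_keys, hkeys]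
  have hmod : g.modify e [] (· ++ [r]) = g.insert e (g.getD e [] ++ [r]) := rfl
  by_cases hc : g.contains e = true
  · -- key already present: A compares filed, B appends to the group
    obtain ⟨grp, hget⟩ : ∃ grp, g.get? e = some grp := by
      have := PySem.Dict.contains_eq_isSome_get? (d := g) (k := e)
      rw [hc] at this
      exact Option.isSome_iff_exists.mp this.symm
    have hmem : (e, grp) ∈ g.items := PySem.Dict.mem_items_of_get?_eq_some g hget
    have hgetD : g.getD e [] = grp := PySem.Dict.getD_of_get?_eq_some g [] hget
    have hgrpne : grp ≠ [] := hNe _ hmem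
    have hdgetD : d.getD e [] = pvMaxByFiled grp := by
      have : (e, pvMaxByFiled grp) ∈ d.items := by
        rw [hItems]; exact List.mem_map_of_mem hmem
      have hnd : d.keys.Nodup := by rw [hkeys]; exact hNodup
      exact PySem.Dict.getD_of_mem_items d this hnd []
    have hBitems : (g.insert e (grp ++ [r])).items =
        g.items.map (fun p => if p.1 == e then (e, grp ++ [r]) else p) :=
      PySem.Dict.items_insert_of_contains g (grp ++ [r]) hc
    have huniq : ∀ p ∈ g.items, p.1 = e → p = (e, grp) := by
      intro p hp hpe
      have := PySem.Dict.get?_eq_some_iff_mem_items (d := g) (k := p.1) (v := p.2) hNodup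
      have hgp : g.get? p.1 = some p.2 := this.mpr (by simpa using hp)
      rw [hpe, hget] at hgp
      obtain ⟨k, v⟩ := p
      simp only at hpe
      subst hpe
      simp_all
    refine ⟨?_, ?_, ?_⟩
    · -- items relation
      rw [hcont, hc]
      simp only [Bool.true_eq_false, if_false, hmod, hgetD, hdgetD, hBitems]
      by_cases hcmp : pvFiled (pvMaxByFiled grp) < pvFiled r
      · simp only [hcmp, if_true]
        have : (d.insert e r).items = d.items.map (fun p => if p.1 == e then (e, r) else p) :=
          PySem.Dict.items_insert_of_contains d r (by rw [hcont]; exact hc)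
        rw [this, hItems, List.map_map, List.map_map]
        apply List.map_congr_left
        intro p hp
        by_cases hpe : p.1 = e
        · have hpeq := huniq p hp hpe
          subst hpeq
          simp [pvMaxByFiled_append grp r hgrpne, hcmp]
        · simp [hpe]
      · simp only [hcmp, if_false]
        rw [hItems, List.map_map]
        apply List.map_congr_left
        intro p hp
        by_cases hpe : p.1 = e
        · have hpeq := huniq p hp hpe
          subst hpeq
          simp [pvMaxByFiled_append grp r hgrpne, hcmp]
        · simp [hpe]
    · rw [hmod, hgetD, PySem.Dict.keys_insert_of_contains g (grp ++ [r]) hc]; exact hNodup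
    · intro p hp
      rw [hmod, hgetD, hBitems] at hp
      obtain ⟨q, hq, hqp⟩ := List.mem_map.mp hp
      by_cases hqe : q.1 = e
      · simp only [beq_iff_eq, hqe, if_true] at hqp
        subst hqp; simp
      · simp only [beq_iff_eq, hqe, if_false] at hqp
        subst hqp; exact hNe _ hq
  · -- fresh key: both append a new entry
    have hc' : g.contains e = false := by simpa using hc
    have hgetD : g.getD e [] = [] := PySem.Dict.getD_of_not_contains _ _ hc'
    refine ⟨?_, ?_, ?_⟩
    · rw [hcont, hc']
      simp only [if_true, hmod, hgetD, List.nil_append]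
      rw [PySem.Dict.items_insert_of_not_contains d r (by rw [hcont]; exact hc'),
          PySem.Dict.items_insert_of_not_contains g [r] hc']
      simp [hItems, pvMaxByFiled]
    · rw [hmod, hgetD, List.nil_append, PySem.Dict.keys_insert_of_not_contains g [r] hc']
      refine List.Nodup.append hNodup (List.nodup_singleton e) ?_
      intro x hx hx'
      simp only [List.mem_singleton] at hx'
      subst hx'
      have := (PySem.Dict.contains_iff_mem_keys (d := g) (k := e)).mpr hx
      rw [hc'] at this; exact Bool.false_ne_true this
    · intro p hp
      rw [hmod, hgetD, List.nil_append, PySem.Dict.items_insert_of_not_contains g [r] hc'] at hp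
      rcases List.mem_append.mp hp with h | h
      · exact hNe _ h
      · simp only [List.mem_singleton] at h
        subst h; simp

theorem pvInv_foldl (rows : List (List (String × String))) (fp_filter : Option String)
    (d : PySem.Dict String (List (String × String)))
    (g : PySem.Dict String (List (List (String × String)))) (hI : pvInv d g) :
    pvInv
      (rows.foldl
        (fun by_end r =>
          if pvSkip1 r fp_filter then by_end
          else if pvSkip2 r fp_filter then by_end
          else
            let e := (pvRowGet r "end").getD ""
            if by_end.contains e = false then by_end.insert e r
            else if pvFiled (by_end.getD e []) < pvFiled r then by_end.insert e r
            else by_end)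
        d)
      (rows.foldl
        (fun groups r =>
          if pvSkip1 r fp_filter then groups
          else if pvSkip2 r fp_filter then groups
          else groups.modify ((pvRowGet r "end").getD "") [] (· ++ [r]))
        g) := by
  induction rows generalizing d g with
  | nil => exact hI
  | cons r t ih =>
    simp only [List.foldl_cons]
    exact ih _ _ (pvInv_step d g fp_filter r hI)

-- ===== VERDICT (by name: the statement is the Claim_ definition above) =====
theorem latest_per_period_spec : Claim_equal_latest_per_period := by
  intro rows fp_filter _ _
  show latest_per_period rows fp_filter = latest_per_period_alt rows fp_filter
  unfold latest_per_period latest_per_period_alt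
  exact (pvInv_foldl rows fp_filter PySem.Dict.empty PySem.Dict.empty
    ⟨by simp [PySem.Dict.empty], by simp [PySem.Dict.empty, PySem.Dict.keys],
     by simp [PySem.Dict.empty]⟩).1
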